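-- pv_equiv track=rewrite | github.com/dawilliams0727/data-structures | week3_hash_tables/3_hash_substring/hash_substring.py | precomputeHash
-- ===== SOURCE A (Python) =====
-- def polyHash(S: str, p: int, x: int):
--     """
--         Compute Hash of string using function from Polynomial Hash Family
--
--         Args:
--             S (str): the string to calculate hash value of
--             p (int): a large prime number greater than the cardinality of the hashing function
--             x (int): a prime number less than p
--
--
--         Returns:
--             int: the hash value of the input string
--     """
--     hash: int = 0
--     i = len(S) - 1
--     while i >= 0:
--         hash = ((hash * x) + ord(S[i])) % p
--         i -= 1
--     return hash
--
-- def precomputeHash(T: str, P: str, p:int, x:int):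
--     """
--         Precompute hashes H of each substring equal to the length of pattern P in text S using recurrence relation
--         between H(i) and H(i+1)
--
--         Args:
--             T (str): the text to precompute the hashes for
--             P (str): the pattern that is being searched for
--             p (int): a prime number larger than the cardinatlity of the hashing table used
--             x (int): a prime number less than p
--
--         Returns:
--             list[int]: list of hashses for each substring equal to the length of the pattern P
--     """
--     lenT, lenP = len(T), len(P)
--     H: list[int] = [-1] * (lenT - lenP + 1)
--     S: str = T[lenT-lenP: lenT]
--     H[lenT-lenP] = polyHash(S,p,x)
--     y: int = 1
--     for _ in range(1, lenP+1):
--         y = (y*x)%p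
--     for i in range(lenT-lenP-1, -1, -1):
--         H[i] = ((x*H[i+1]) + ord(T[i]) - (y * ord(T[i + lenP]))) % p
--     return H
-- ===== SOURCE B (Python) =====
-- def polyHash(S, p, x):
--     hash = 0
--     i = len(S) - 1
--     while i >= 0:
--         hash = ((hash * x) + ord(S[i])) % p
--         i -= 1
--     return hash
--
--
-- def precomputeHash(T, P, p, x):
--     # Direct per-window polynomial hash: one comprehension, no rolling
--     # recurrence and no x**lenP precomputation.
--     lenP = len(P)
--     return [polyHash(T[i:i + lenP], p, x) for i in range(len(T) - lenP + 1)]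
-- ===== Notes on version B (the rewrite author's own statement) =====
-- stated objective: simpler
-- what changed: Replaced the backward rolling-hash recurrence (with its x^len(P) precomputation loop and in-place list updates) by a single comprehension that computes each window's polynomial hash directly from scratch.
import Mathlib
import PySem

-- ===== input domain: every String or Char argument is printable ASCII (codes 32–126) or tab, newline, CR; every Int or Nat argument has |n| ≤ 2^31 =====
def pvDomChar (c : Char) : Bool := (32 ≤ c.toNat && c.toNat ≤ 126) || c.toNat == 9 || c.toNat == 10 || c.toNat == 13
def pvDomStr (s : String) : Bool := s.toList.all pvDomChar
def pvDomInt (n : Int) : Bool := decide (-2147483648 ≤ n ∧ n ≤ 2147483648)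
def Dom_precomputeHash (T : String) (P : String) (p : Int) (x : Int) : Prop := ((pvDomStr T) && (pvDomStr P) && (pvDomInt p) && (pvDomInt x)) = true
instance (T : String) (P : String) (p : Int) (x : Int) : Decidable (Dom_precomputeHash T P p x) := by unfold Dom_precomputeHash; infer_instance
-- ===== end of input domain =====

-- B replaces A's backward rolling-hash recurrence (and its x^len(P) precomputation)
-- by directly hashing each window; objective: simpler.


-- ===== PORT A =====
-- shared module helper polyHash (while loop from the last char down = foldr over the chars;
-- ord c is exactly c.toNat)
def pvPolyHash (S : List Char) (p : Int) (x : Int) : Int :=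
  S.foldr (fun c hash => PySem.Int.mod (hash * x + (c.toNat : Int)) p) 0

def precomputeHash (T : String) (P : String) (p : Int) (x : Int) : List Int :=
  let cs := T.toList
  let lenT : Int := (cs.length : Int)
  let lenP : Int := (P.toList.length : Int)
  let H : List Int := List.replicate (lenT - lenP + 1).toNat (-1)
  let S : List Char := PySem.List.slice cs (some (lenT - lenP)) (some lenT)
  let H : List Int := PySem.List.pySetD H (lenT - lenP) (pvPolyHash S p x)
  let y : Int := (PySem.List.pyRange 1 (lenP + 1) 1).foldl (fun y _ => PySem.Int.mod (y * x) p) 1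
  (PySem.List.pyRange (lenT - lenP - 1) (-1) (-1)).foldl
    (fun H i =>
      PySem.List.pySetD H i
        (PySem.Int.mod
          (x * PySem.List.pyGetD H (i + 1) 0 + ((PySem.List.pyGetD cs i ' ').toNat : Int)
            - y * ((PySem.List.pyGetD cs (i + lenP) ' ').toNat : Int)) p))
    H

-- ===== PORT B =====
def precomputeHash_alt (T : String) (P : String) (p : Int) (x : Int) : List Int :=
  let lenP : Int := (P.toList.length : Int)
  (PySem.List.pyRange 0 ((T.toList.length : Int) - lenP + 1) 1).map
    (fun i => pvPolyHash (PySem.List.slice T.toList (some i) (some (i + lenP))) p x)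

-- ===== PRECONDITION & SPEC =====
-- Pre_ excludes exactly the inputs on which A raises: len(T) < len(P) (IndexError on
-- H[lenT-lenP]) and p = 0 with non-empty T (ZeroDivisionError in some '% p').
def Pre_precomputeHash (T : String) (P : String) (p : Int) (x : Int) : Prop :=
  P.toList.length ≤ T.toList.length ∧ (p ≠ 0 ∨ T.toList.length = 0)
instance (T : String) (P : String) (p : Int) (x : Int) : Decidable (Pre_precomputeHash T P p x) := by unfold Pre_precomputeHash; infer_instance
def pvWitness_precomputeHash : String × String × Int × Int := ("ab", "a", 5, 2)

def Spec_precomputeHash (T : String) (P : String) (p : Int) (x : Int) (out : List Int) : Prop := out = precomputeHash_alt T P p x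
instance (T : String) (P : String) (p : Int) (x : Int) (out : List Int) : Decidable (Spec_precomputeHash T P p x out) := by unfold Spec_precomputeHash; infer_instance

-- ===== CLAIM (what is proved, stated in full; the proofs are below) =====
def Claim_equal_precomputeHash : Prop := ∀ (T : String) (P : String) (p : Int) (x : Int), Dom_precomputeHash T P p x → Pre_precomputeHash T P p x → Spec_precomputeHash T P p x (precomputeHash T P p x)

-- ===== LEMMAS AND PROOFS =====

-- plain (un-modded) Horner value of a char list
def pvHorner (x : Int) : List Char → Int
  | [] => 0
  | c :: cs => (c.toNat : Int) + x * pvHorner x cs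

theorem pvmod_congr {p : Int} (a b : Int) (hp : p ≠ 0) (h : p ∣ a - b) :
    PySem.Int.mod a p = PySem.Int.mod b p := by
  have ha := PySem.Int.floordiv_mul_add_mod a p
  have hb := PySem.Int.floordiv_mul_add_mod b p
  have hdvd : p ∣ PySem.Int.mod a p - PySem.Int.mod b p := by
    have : PySem.Int.mod a p - PySem.Int.mod b p
        = (a - b) - (PySem.Int.floordiv a p - PySem.Int.floordiv b p) * p := by ring_nf; omega
    rw [this]
    exact dvd_sub h (Dvd.dvd.mul_left (dvd_refl p) _)
  have habs : |PySem.Int.mod a p - PySem.Int.mod b p| < |p| := by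
    rcases lt_or_gt_of_ne hp with hneg | hpos
    · have b1 := PySem.Int.mod_neg_bounds a hneg
      have b2 := PySem.Int.mod_neg_bounds b hneg
      rw [abs_of_neg hneg]
      rcases abs_cases (PySem.Int.mod a p - PySem.Int.mod b p) with ⟨h5, _⟩ | ⟨h5, _⟩ <;> omega
    · have b1 := PySem.Int.mod_nonneg a hpos
      have b2 := PySem.Int.mod_nonneg b hpos
      have b3 := PySem.Int.mod_lt a hpos
      have b4 := PySem.Int.mod_lt b hpos
      rw [abs_of_pos hpos]; rcases abs_cases (PySem.Int.mod a p - PySem.Int.mod b p) with ⟨h5, _⟩ | ⟨h5, _⟩ <;> omega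
  have := Int.eq_zero_of_abs_lt_dvd ((abs_dvd p _).mpr hdvd) habs
  omega

theorem pvPolyHash_eq_mod_horner {p : Int} (hp : p ≠ 0) (x : Int) (l : List Char) :
    pvPolyHash l p x = PySem.Int.mod (pvHorner x l) p ∧ p ∣ pvPolyHash l p x - pvHorner x l := by
  induction l with
  | nil =>
    constructor
    · simp [pvPolyHash, pvHorner, (PySem.Int.mod_eq_zero_iff_dvd 0 p).2 (dvd_zero p)]
    · simp [pvPolyHash, pvHorner]
  | cons c cs ih =>
    have hstep : pvPolyHash (c :: cs) p x
        = PySem.Int.mod (pvPolyHash cs p x * x + (c.toNat : Int)) p := rfl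
    have hcong : PySem.Int.mod (pvPolyHash cs p x * x + (c.toNat : Int)) p
        = PySem.Int.mod (pvHorner x (c :: cs)) p := by
      apply pvmod_congr _ _ hp
      have : pvPolyHash cs p x * x + (c.toNat : Int) - pvHorner x (c :: cs)
          = (pvPolyHash cs p x - pvHorner x cs) * x := by simp [pvHorner]; ring
      rw [this]
      exact Dvd.dvd.mul_right ih.2 x
    refine ⟨hstep.trans hcong, ?_⟩
    rw [hstep, hcong]
    have h0 := PySem.Int.floordiv_mul_add_mod (pvHorner x (c :: cs)) p
    exact ⟨-(PySem.Int.floordiv (pvHorner x (c :: cs)) p), by linarith⟩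

theorem pvHorner_append (x : Int) (l : List Char) (c : Char) :
    pvHorner x (l ++ [c]) = pvHorner x l + x ^ l.length * (c.toNat : Int) := by
  induction l with
  | nil => simp [pvHorner]
  | cons d ds ih => simp [pvHorner, ih]; ring

theorem pvY_congr {p x : Int} (hp : p ≠ 0) (l : List Int) :
    ∀ y0 : Int, p ∣ (l.foldl (fun y _ => PySem.Int.mod (y * x) p) y0) - y0 * x ^ l.length := by
  induction l with
  | nil => intro y0; simp
  | cons a l ih =>
    intro y0
    have h1 := ih (PySem.Int.mod (y0 * x) p)
    have h2 : p ∣ PySem.Int.mod (y0 * x) p - y0 * x := by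
      have := PySem.Int.floordiv_mul_add_mod (y0 * x) p
      exact ⟨-(PySem.Int.floordiv (y0 * x) p), by linarith⟩
    rw [List.foldl_cons]
    have hsplit : (l.foldl (fun y _ => PySem.Int.mod (y * x) p) (PySem.Int.mod (y0 * x) p))
        - y0 * x ^ (a :: l).length
        = ((l.foldl (fun y _ => PySem.Int.mod (y * x) p) (PySem.Int.mod (y0 * x) p))
            - (PySem.Int.mod (y0 * x) p) * x ^ l.length)
          + (PySem.Int.mod (y0 * x) p - y0 * x) * x ^ l.length := by
      simp [List.length_cons, pow_succ]; ring
    rw [hsplit]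
    exact dvd_add h1 (Dvd.dvd.mul_right h2 (x ^ l.length))

-- window recurrence as an exact integer identity
theorem pvHorner_window (x : Int) (cs : List Char) (i lenP : Nat) (h : i + lenP < cs.length) :
    pvHorner x ((cs.drop i).take lenP)
      = (cs[i]'(by omega)).toNat + x * pvHorner x ((cs.drop (i+1)).take lenP)
        - x ^ lenP * (cs[i+lenP]'h).toNat := by
  cases lenP with
  | zero => simp [pvHorner]
  | succ m =>
    have hd : cs.drop i = cs[i]'(by omega) :: cs.drop (i+1) :=
      List.drop_eq_getElem_cons (by omega)
    have hV : (cs.drop (i+1)).take (m+1)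
        = (cs.drop (i+1)).take m ++ [cs[i+m+1]'(by omega)] := by
      rw [List.take_succ]
      have hlt : m < (cs.drop (i+1)).length := by simp; omega
      have : (cs.drop (i+1))[m]? = some ((cs.drop (i+1))[m]'hlt) := List.getElem?_eq_getElem hlt
      rw [this]
      congr 1
      simp [List.getElem_drop]
      congr 1
      omega
    have hlenV : ((cs.drop (i+1)).take m).length = m := by
      simp; omega
    have hidx : i + (m+1) = i + m + 1 := by omega
    rw [hd, List.take_succ_cons, hV, pvHorner_append, hlenV]
    simp [pvHorner, hidx, pow_succ]
    ring

-- invariant for A's backward fill loop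
theorem pvLoopA {p x y : Int} (cs : List Char) (n lenP : Nat)
    (hlen : cs.length = n + lenP) (hp : p ≠ 0) (hy : p ∣ y - x ^ lenP) :
    ∀ (m : Nat) (H : List Int), m ≤ n → H.length = n + 1 →
      (∀ j : Nat, m ≤ j → j ≤ n → H.getD j 0 = PySem.Int.mod (pvHorner x ((cs.drop j).take lenP)) p) →
      (PySem.List.pyRange ((m : Int) - 1) (-1) (-1)).foldl
        (fun H i =>
          PySem.List.pySetD H i
            (PySem.Int.mod
              (x * PySem.List.pyGetD H (i + 1) 0 + ((PySem.List.pyGetD cs i ' ').toNat : Int)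
                - y * ((PySem.List.pyGetD cs (i + (lenP : Int)) ' ').toNat : Int)) p))
        H
      = (List.range (n + 1)).map (fun k => PySem.Int.mod (pvHorner x ((cs.drop k).take lenP)) p) := by
  intro m
  induction m with
  | zero =>
    intro H _ hHlen hinv
    rw [PySem.List.pyRange_neg_one_eq_nil (by norm_num)]
    simp only [List.foldl_nil]
    apply List.ext_getElem (by simp [hHlen])
    intro j h1 h2
    have hj : j ≤ n := by simp [hHlen] at h1; omega
    have := hinv j (Nat.zero_le j) hj
    rw [List.getD_eq_getElem H 0 h1] at this
    simp [this]
  | succ m ih =>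
    intro H hm hHlen hinv
    have hcast : ((m + 1 : Nat) : Int) - 1 = (m : Int) := by push_cast; ring
    rw [hcast, PySem.List.pyRange_neg_one_cons (by omega : (-1 : Int) < (m : Int))]
    rw [List.foldl_cons]
    -- evaluate the body at i = m
    have hget : PySem.List.pyGetD H ((m : Int) + 1) 0 = H.getD (m + 1) 0 := by
      rw [show ((m : Int) + 1) = ((m + 1 : Nat) : Int) by push_cast; ring,
        PySem.List.pyGetD_natCast]
    have hH1 : H.getD (m + 1) 0 = PySem.Int.mod (pvHorner x ((cs.drop (m+1)).take lenP)) p :=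
      hinv (m + 1) (le_refl _) (by omega)
    have hcm : PySem.List.pyGetD cs (m : Int) ' ' = cs[m]'(by omega) := by
      rw [PySem.List.pyGetD_eq_getElem cs ' ' (by positivity) (by push_cast; omega)]
      simp
    have hcm2 : PySem.List.pyGetD cs ((m : Int) + (lenP : Int)) ' ' = cs[m + lenP]'(by omega) := by
      rw [show ((m : Int) + (lenP : Int)) = ((m + lenP : Nat) : Int) by push_cast; ring,
        PySem.List.pyGetD_natCast, List.getD_eq_getElem cs ' ' (by omega)]
    -- the value written at index m equals the target
    have hval : PySem.Int.mod
        (x * PySem.List.pyGetD H ((m : Int) + 1) 0 + ((PySem.List.pyGetD cs (m : Int) ' ').toNat : Int)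
          - y * ((PySem.List.pyGetD cs ((m : Int) + (lenP : Int)) ' ').toNat : Int)) p
        = PySem.Int.mod (pvHorner x ((cs.drop m).take lenP)) p := by
      rw [hget, hH1, hcm, hcm2]
      apply pvmod_congr _ _ hp
      rw [pvHorner_window x cs m lenP (by omega)]
      have hmodd : p ∣ PySem.Int.mod (pvHorner x ((cs.drop (m+1)).take lenP)) p
          - pvHorner x ((cs.drop (m+1)).take lenP) := by
        have := PySem.Int.floordiv_mul_add_mod (pvHorner x ((cs.drop (m+1)).take lenP)) p
        exact ⟨-(PySem.Int.floordiv (pvHorner x ((cs.drop (m+1)).take lenP)) p), by linarith⟩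
      have key : x * PySem.Int.mod (pvHorner x ((cs.drop (m+1)).take lenP)) p
            + ((cs[m]'(by omega)).toNat : Int)
            - y * ((cs[m + lenP]'(by omega)).toNat : Int)
          - (((cs[m]'(by omega)).toNat : Int) + x * pvHorner x ((cs.drop (m+1)).take lenP)
              - x ^ lenP * ((cs[m + lenP]'(by omega)).toNat : Int))
          = (PySem.Int.mod (pvHorner x ((cs.drop (m+1)).take lenP)) p
              - pvHorner x ((cs.drop (m+1)).take lenP)) * x
            - (y - x ^ lenP) * ((cs[m + lenP]'(by omega)).toNat : Int) := by ring
      rw [key]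
      exact dvd_sub (Dvd.dvd.mul_right hmodd x) (Dvd.dvd.mul_right hy _)
    rw [hval, PySem.List.pySetD_natCast]
    apply ih _ (by omega) (by simp [hHlen])
    intro j hj1 hj2
    rcases Nat.eq_or_lt_of_le hj1 with heq | hlt
    · rw [← heq, List.getD_eq_getElem _ 0 (by simp [hHlen]; omega)]
      simp [List.getElem_set_self]
    · have : (H.set m (PySem.Int.mod (pvHorner x ((cs.drop m).take lenP)) p)).getD j 0
          = H.getD j 0 := by
        rw [List.getD_eq_getElem _ 0 (by simp [hHlen]; omega),
          List.getD_eq_getElem _ 0 (by simp [hHlen]; omega)]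
        exact List.getElem_set_ne (Nat.ne_of_lt hlt) _
      rw [this]
      exact hinv j (by omega) hj2

-- ===== VERDICT (by name: the statement is the Claim_ definition above) =====
theorem precomputeHash_spec : Claim_equal_precomputeHash := by
  intro T P p x _ hpre
  unfold Spec_precomputeHash
  obtain ⟨hle, hp0⟩ := hpre
  set cs := T.toList with hcs
  set lenP := P.toList.length with hlenP
  set n := cs.length - lenP with hn
  have hlen : cs.length = n + lenP := by omega
  -- rewrite both ports into Nat-indexed form
  have hA : precomputeHash T P p x
      = (PySem.List.pyRange ((n : Int) - 1) (-1) (-1)).foldl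
          (fun H i =>
            PySem.List.pySetD H i
              (PySem.Int.mod
                (x * PySem.List.pyGetD H (i + 1) 0 + ((PySem.List.pyGetD cs i ' ').toNat : Int)
                  - ((PySem.List.pyRange 1 ((lenP : Int) + 1) 1).foldl
                      (fun y _ => PySem.Int.mod (y * x) p) 1)
                    * ((PySem.List.pyGetD cs (i + (lenP : Int)) ' ').toNat : Int)) p))
          ((List.replicate (n + 1) (-1 : Int)).set n
            (pvPolyHash ((cs.drop n).take lenP) p x)) := by
    unfold precomputeHash
    rw [← hcs, ← hlenP]
    have e3 : ((cs.length : Int)) = ((n : Nat) : Int) + ((lenP : Nat) : Int) := by push_cast; omega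
    simp only [e3]
    have f2 : ((n : Nat) : Int) + ((lenP : Nat) : Int) - ((lenP : Nat) : Int) = ((n : Nat) : Int) := by
      ring
    simp only [f2]
    have f1 : (((n : Nat) : Int) + 1).toNat = n + 1 := by omega
    simp only [f1]
    rw [PySem.List.slice_natCast_add, PySem.List.pySetD_natCast]
  by_cases hp : p = 0
  · -- then T is empty, hence P is empty too; both sides are [0]
    have hTn : cs.length = 0 := by
      rcases hp0 with h | h
      · exact absurd hp h
      · exact h
    have hcse : cs = [] := List.eq_nil_of_length_eq_zero hTn
    have hPn : lenP = 0 := by omega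
    have hne : n = 0 := by omega
    rw [hA]
    unfold precomputeHash_alt
    rw [← hcs, ← hlenP]
    simp [hcse, hPn, hne, pvPolyHash, PySem.List.pyRange_one, PySem.List.slice,
      PySem.List.clampIdx]
  · -- main case: p ≠ 0
    set y := (PySem.List.pyRange 1 ((lenP : Int) + 1) 1).foldl
        (fun y _ => PySem.Int.mod (y * x) p) 1 with hy
    have hylen : (PySem.List.pyRange 1 ((lenP : Int) + 1) 1).length = lenP := by
      rw [PySem.List.length_pyRange_one]; omega
    have hydvd : p ∣ y - x ^ lenP := by
      have := pvY_congr (p := p) (x := x) hp (PySem.List.pyRange 1 ((lenP : Int) + 1) 1) 1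
      rw [hylen] at this
      simpa using this
    have hg := fun l => pvPolyHash_eq_mod_horner (p := p) hp x l
    have hinit : ∀ j : Nat, n ≤ j → j ≤ n →
        ((List.replicate (n + 1) (-1 : Int)).set n
          (pvPolyHash ((cs.drop n).take lenP) p x)).getD j 0
        = PySem.Int.mod (pvHorner x ((cs.drop j).take lenP)) p := by
      intro j h1 h2
      have hj : j = n := by omega
      subst hj
      rw [List.getD_eq_getElem _ 0 (by simp)]
      rw [List.getElem_set_self (by simp)]
      exact (hg _).1
    have := pvLoopA (p := p) (x := x) (y := y) cs n lenP hlen hp hydvd n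
      ((List.replicate (n + 1) (-1 : Int)).set n (pvPolyHash ((cs.drop n).take lenP) p x))
      (le_refl n) (by simp) hinit
    rw [hA, this]
    -- B side
    simp only [precomputeHash_alt]
    rw [← hcs, ← hlenP]
    have e5 : ((cs.length : Int) - (lenP : Int) + 1) = ((n + 1 : Nat) : Int) := by push_cast; omega
    rw [e5, PySem.List.pyRange_zero_natCast, List.map_map]
    apply List.map_congr_left
    intro k hk
    simp only [Function.comp]
    rw [show ((k : Int) + (lenP : Int)) = ((k : Nat) : Int) + ((lenP : Nat) : Int) by push_cast; ring]
    rw [PySem.List.slice_natCast_add]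
    exact ((hg _).1).symm
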